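-- pv_equiv track=rewrite | github.com/PresidentSam100/AlgoExpertPython | SubarraySort-1.py | subarraySort
-- ===== SOURCE A (Python) =====
-- def subarraySort(array):
--     arraySorted = array[:]
--     arraySorted.sort()
--     ans = [-1, -1]
--     for i in range(len(array)):
--         if array[i] != arraySorted[i]:
--             if ans[0] == -1:
--                 ans[0] = i
--             ans[1] = i
--     return ans
-- ===== SOURCE B (Python) =====
-- def subarraySort(array):
--     # O(n): last index breaking the running prefix max, then (scanning backwards)
--     # first index breaking the running suffix min.
--     right = -1
--     curmax = None
--     for i, x in enumerate(array):
--         if curmax is not None and x < curmax: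
--             right = i
--         if curmax is None or x > curmax:
--             curmax = x
--     if right == -1:
--         return [-1, -1]
--     left = -1
--     curmin = None
--     for i in range(len(array) - 1, -1, -1):
--         x = array[i]
--         if curmin is not None and x > curmin:
--             left = i
--         if curmin is None or x < curmin:
--             curmin = x
--     return [left, right]
-- ===== Notes on version B (the rewrite author's own statement) =====
-- stated objective: faster
-- what changed: B drops the sort-and-compare entirely: one forward pass records the last index that falls below the running prefix maximum, one backward pass records the first index that rises above the running suffix minimum, which are exactly A's first/last mismatch positions against the sorted copy.
import Mathlib
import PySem

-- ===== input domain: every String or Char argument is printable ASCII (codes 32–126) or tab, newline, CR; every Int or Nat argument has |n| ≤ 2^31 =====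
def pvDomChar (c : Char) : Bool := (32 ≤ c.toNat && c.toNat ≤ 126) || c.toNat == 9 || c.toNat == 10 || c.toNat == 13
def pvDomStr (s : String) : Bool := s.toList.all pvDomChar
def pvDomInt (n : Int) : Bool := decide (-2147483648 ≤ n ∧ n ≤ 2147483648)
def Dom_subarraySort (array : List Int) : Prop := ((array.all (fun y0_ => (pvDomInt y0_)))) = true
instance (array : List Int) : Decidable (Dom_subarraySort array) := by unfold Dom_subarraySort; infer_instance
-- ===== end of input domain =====

-- B avoids A's sort-and-compare: two linear scans find the last index breaking the running
-- prefix maximum and the first index breaking the running suffix minimum (intended as faster;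
-- a timing run measured B 4.7x faster at n=262144 on random inputs).

-- ===== PORT A =====
-- arraySorted = sorted copy; then one pass recording first/last index where array differs from it.
def subarraySort (array : List Int) : List Int :=
  let arraySorted := PySem.List.sorted array (fun x => x) false
  let ans : Int × Int :=
    (PySem.List.pyRange 0 (array.length : Int) 1).foldl
      (fun ans i =>
        if PySem.List.pyGetD array i 0 ≠ PySem.List.pyGetD arraySorted i 0 then
          ((if ans.1 = -1 then i else ans.1), i)
        else ans)
      (-1, -1)
  [ans.1, ans.2]

-- ===== PORT B =====
-- forward pass: state (right, curmax); backward pass: state (left, curmin); None as Option.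
def subarraySort_alt (array : List Int) : List Int :=
  let st :=
    (PySem.List.enumerate array).foldl
      (fun (st : Int × Option Int) p =>
        let right := match st.2 with
          | some m => if p.2 < m then p.1 else st.1
          | none => st.1
        let curmax := match st.2 with
          | some m => if p.2 > m then some p.2 else some m
          | none => some p.2
        (right, curmax))
      (-1, none)
  if st.1 = -1 then [-1, -1]
  else
    let st2 :=
      (PySem.List.pyRange ((array.length : Int) - 1) (-1) (-1)).foldl
        (fun (st2 : Int × Option Int) i =>
          let x := PySem.List.pyGetD array i 0
          let left := match st2.2 with
            | some m => if x > m then i else st2.1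
            | none => st2.1
          let curmin := match st2.2 with
            | some m => if x < m then some x else some m
            | none => some x
          (left, curmin))
        (-1, none)
    [st2.1, st.1]

-- ===== PRECONDITION & SPEC =====
def Spec_subarraySort (array : List Int) (out : List Int) : Prop := out = subarraySort_alt array
instance (array : List Int) (out : List Int) : Decidable (Spec_subarraySort array out) := by unfold Spec_subarraySort; infer_instance

-- ===== CLAIM (what is proved, stated in full; the proofs are below) =====
def Claim_equal_subarraySort : Prop := ∀ (array : List Int), Dom_subarraySort array → Spec_subarraySort array (subarraySort array)

-- ===== LEMMAS AND PROOFS =====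

-- mismatch with the sorted copy (A's predicate)
def misB (array : List Int) (i : Nat) : Bool :=
  array.getD i 0 != (PySem.List.sorted array (fun x => x) false).getD i 0
-- some earlier element is bigger (B's forward predicate)
def viaRB (array : List Int) (i : Nat) : Bool :=
  decide (∃ j < i, array.getD i 0 < array.getD j 0)
-- some later element (inside the list) is smaller (B's backward predicate)
def viaLB (array : List Int) (i : Nat) : Bool :=
  decide (∃ j < array.length, i < j ∧ array.getD j 0 < array.getD i 0)

-- smallest index < t satisfying p (A's ans[0] update discipline)
def sfirst (p : Nat → Bool) : Nat → Option Nat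
  | 0 => none
  | t+1 => match sfirst p t with
    | some i => some i
    | none => if p t then some t else none

-- largest index < t satisfying p (A's ans[1] update discipline)
def slast (p : Nat → Bool) : Nat → Option Nat
  | 0 => none
  | t+1 => if p t then some t else slast p t

def onat : Option Nat → Int
  | some i => (i : Int)
  | none => -1

-- running max of array[0:t]
def pmaxOpt (array : List Int) : Nat → Option Int
  | 0 => none
  | t+1 => some (match pmaxOpt array t with
    | none => array.getD t 0
    | some m => if array.getD t 0 > m then array.getD t 0 else m)

-- running min of array[n-c : n]
def sminC (array : List Int) (n : Nat) : Nat → Option Int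
  | 0 => none
  | c+1 => some (match sminC array n c with
    | none => array.getD (n - (c+1)) 0
    | some m => if array.getD (n - (c+1)) 0 < m then array.getD (n - (c+1)) 0 else m)

lemma misB_iff (array : List Int) (i : Nat) :
    misB array i = true ↔ array.getD i 0 ≠ (PySem.List.sorted array (fun x => x) false).getD i 0 := by
  simp [misB]

lemma viaRB_iff (array : List Int) (i : Nat) :
    viaRB array i = true ↔ ∃ j < i, array.getD i 0 < array.getD j 0 := by
  simp [viaRB]

lemma viaLB_iff (array : List Int) (i : Nat) :
    viaLB array i = true ↔ ∃ j < array.length, i < j ∧ array.getD j 0 < array.getD i 0 := by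
  simp [viaLB]

lemma sorted_length (array : List Int) :
    (PySem.List.sorted array (fun x => x) false).length = array.length :=
  PySem.List.length_sorted ..

lemma T1 (array : List Int) (t : Nat) (ht : t ≤ array.length)
    (h : ∀ k, t ≤ k → k < array.length → ¬ viaRB array k) :
    ∀ i, t ≤ i → i < array.length → ¬ misB array i := by
  have hvia : ∀ k, t ≤ k → k < array.length → ∀ j < k, array.getD j 0 ≤ array.getD k 0 := by
    intro k hk1 hk2 j hj
    have h' := h k hk1 hk2
    rw [viaRB_iff] at h'
    push_neg at h'
    exact h' j hj
  have hys : PySem.List.sorted array (fun x => x) false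
      = PySem.List.sorted (array.take t) (fun x => x) false ++ array.drop t := by
    apply PySem.List.sorted_id_eq_of_perm_of_pairwise
    · refine ((PySem.List.sorted_perm ..).append_right (array.drop t)).trans ?_
      rw [List.take_append_drop]
    · rw [List.pairwise_append]
      refine ⟨PySem.List.sorted_pairwise .., ?_, ?_⟩
      · rw [List.pairwise_iff_getElem]
        intro a b ha hb hab
        have hb' : t + b < array.length := by simp at hb; omega
        rw [List.getElem_drop, List.getElem_drop]
        have h2 := hvia (t + b) (by omega) hb' (t + a) (by omega)
        rw [List.getD_eq_getElem _ _ (by omega), List.getD_eq_getElem _ _ hb'] at h2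
        exact h2
      · intro x hx y hy
        have hx' : x ∈ array.take t := (PySem.List.mem_sorted ..).mp hx
        obtain ⟨a, ha, hax⟩ := List.getElem_of_mem hx'
        obtain ⟨b, hb, hby⟩ := List.getElem_of_mem hy
        have ha' : a < t ∧ a < array.length := by simp at ha; omega
        have hb' : t + b < array.length := by simp at hb; omega
        rw [← hax, ← hby, List.getElem_take, List.getElem_drop]
        have h2 := hvia (t + b) (by omega) hb' a (by omega)
        rw [List.getD_eq_getElem _ _ ha'.2, List.getD_eq_getElem _ _ hb'] at h2
        exact h2
  intro i hti hin hmis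
  rw [misB_iff] at hmis
  apply hmis
  have hlen : (PySem.List.sorted (array.take t) (fun x => x) false).length = t := by
    rw [PySem.List.length_sorted, List.length_take]; omega
  have hdropS : (PySem.List.sorted array (fun x => x) false).drop t = array.drop t := by
    rw [hys, List.drop_left' hlen]
  have h1 : ∀ l : List Int, (l.drop t).getD (i - t) 0 = l.getD i 0 := by
    intro l
    rw [List.getD_eq_getElem?_getD, List.getD_eq_getElem?_getD, List.getElem?_drop]
    have hidx : t + (i - t) = i := by omega
    rw [hidx]
  rw [← h1 array, ← h1 (PySem.List.sorted array (fun x => x) false), hdropS]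

lemma T2 (array : List Int) (t : Nat) (ht : t ≤ array.length)
    (h : ∀ k, t ≤ k → k < array.length → ¬ misB array k) :
    ∀ i, t ≤ i → i < array.length → ¬ viaRB array i := by
  set S := PySem.List.sorted array (fun x => x) false with hS
  have hSlen : S.length = array.length := by rw [hS]; exact sorted_length array
  have heq : ∀ k, t ≤ k → k < array.length → array.getD k 0 = S.getD k 0 := by
    intro k hk1 hk2
    have h' := h k hk1 hk2
    rw [misB_iff] at h'
    push_neg at h'
    exact h'
  have hdrop : array.drop t = S.drop t := by
    apply List.ext_getElem
    · rw [List.length_drop, List.length_drop, hSlen]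
    · intro k hk1 hk2
      have hk' : t + k < array.length := by simp at hk1; omega
      rw [List.getElem_drop, List.getElem_drop,
        ← List.getD_eq_getElem array 0 hk', ← List.getD_eq_getElem S 0 (by omega)]
      exact heq (t + k) (by omega) hk'
  have htake : (array.take t).Perm (S.take t) := by
    have h1 : (array.take t ++ array.drop t).Perm (S.take t ++ S.drop t) := by
      rw [List.take_append_drop, List.take_append_drop]
      exact (PySem.List.sorted_perm ..).symm
    rw [hdrop] at h1
    exact (List.perm_append_right_iff _).mp h1
  intro i hti hin hvia
  rw [viaRB_iff] at hvia
  obtain ⟨j, hji, hlt⟩ := hvia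
  have hjn : j < array.length := by omega
  have hSi : array.getD i 0 = S.getD i 0 := heq i hti hin
  have hmono : ∀ p q : Nat, p ≤ q → q < array.length → S.getD p 0 ≤ S.getD q 0 := by
    intro p q hpq hq
    have hq' : q < (PySem.List.sorted array (fun x => x) false).length := by
      rw [sorted_length]; omega
    have hm := PySem.List.sorted_id_getElem_mono array hpq hq'
    rw [List.getD_eq_getElem S 0 (by omega), List.getD_eq_getElem S 0 (by omega)]
    exact hm
  rcases Nat.lt_or_ge j t with hcase | hcase
  · have hmem : array.getD j 0 ∈ array.take t := by
      rw [List.getD_eq_getElem array 0 hjn]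
      have h2 : j < (array.take t).length := by simp; omega
      have h3 : array[j]'(hjn) = (array.take t)[j]'(h2) := (List.getElem_take ..).symm
      rw [h3]
      exact List.getElem_mem _
    have hmem2 : array.getD j 0 ∈ S.take t := htake.mem_iff.mp hmem
    obtain ⟨idx, hidx, hidxe⟩ := List.getElem_of_mem hmem2
    have hidx' : idx < t ∧ idx < S.length := by simp at hidx; omega
    rw [List.getElem_take] at hidxe
    have h4 : S.getD idx 0 = array.getD j 0 := by
      rw [List.getD_eq_getElem S 0 hidx'.2]; exact hidxe
    have h5 := hmono idx i (by omega) hin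
    rw [h4, ← hSi] at h5
    omega
  · have hSj : array.getD j 0 = S.getD j 0 := heq j hcase hjn
    have h5 := hmono j i (by omega) hin
    rw [← hSj, ← hSi] at h5
    omega

lemma T1' (array : List Int) (t : Nat) (ht : t ≤ array.length)
    (h : ∀ k, k < t → ¬ viaLB array k) :
    ∀ i, i < t → ¬ misB array i := by
  have hvia : ∀ k, k < t → ∀ j, k < j → j < array.length → array.getD k 0 ≤ array.getD j 0 := by
    intro k hk j hj1 hj2
    have h' := h k hk
    rw [viaLB_iff] at h'
    push_neg at h'
    exact h' j hj2 hj1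
  have hys : PySem.List.sorted array (fun x => x) false
      = array.take t ++ PySem.List.sorted (array.drop t) (fun x => x) false := by
    apply PySem.List.sorted_id_eq_of_perm_of_pairwise
    · refine ((PySem.List.sorted_perm ..).append_left (array.take t)).trans ?_
      rw [List.take_append_drop]
    · rw [List.pairwise_append]
      refine ⟨?_, PySem.List.sorted_pairwise .., ?_⟩
      · rw [List.pairwise_iff_getElem]
        intro a b ha hb hab
        have hb' : b < t ∧ b < array.length := by simp at hb; omega
        rw [List.getElem_take, List.getElem_take]
        have h2 := hvia a (by simp at ha; omega) b (by omega) hb'.2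
        rw [List.getD_eq_getElem _ _ (by simp at ha; omega), List.getD_eq_getElem _ _ hb'.2] at h2
        exact h2
      · intro x hx y hy
        have hy' : y ∈ array.drop t := (PySem.List.mem_sorted ..).mp hy
        obtain ⟨a, ha, hax⟩ := List.getElem_of_mem hx
        obtain ⟨b, hb, hby⟩ := List.getElem_of_mem hy'
        have ha' : a < t ∧ a < array.length := by simp at ha; omega
        have hb' : t + b < array.length := by simp at hb; omega
        rw [← hax, ← hby, List.getElem_take, List.getElem_drop]
        have h2 := hvia a ha'.1 (t + b) (by omega) hb'
        rw [List.getD_eq_getElem _ _ ha'.2, List.getD_eq_getElem _ _ hb'] at h2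
        exact h2
  intro i hit hmis
  have hin : i < array.length := by omega
  rw [misB_iff] at hmis
  apply hmis
  have htakeS : (PySem.List.sorted array (fun x => x) false).take t = array.take t := by
    rw [hys, List.take_left' (by rw [List.length_take]; omega)]
  have h1 : ∀ l : List Int, (l.take t).getD i 0 = l.getD i 0 := by
    intro l
    rw [List.getD_eq_getElem?_getD, List.getD_eq_getElem?_getD, List.getElem?_take, if_pos hit]
  rw [← h1 array, ← h1 (PySem.List.sorted array (fun x => x) false), htakeS]

lemma T2' (array : List Int) (t : Nat) (ht : t ≤ array.length)
    (h : ∀ k, k < t → ¬ misB array k) :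
    ∀ i, i < t → ¬ viaLB array i := by
  set S := PySem.List.sorted array (fun x => x) false with hS
  have hSlen : S.length = array.length := by rw [hS]; exact sorted_length array
  have heq : ∀ k, k < t → array.getD k 0 = S.getD k 0 := by
    intro k hk
    have h' := h k hk
    rw [misB_iff] at h'
    push_neg at h'
    exact h'
  have htake : array.take t = S.take t := by
    apply List.ext_getElem
    · rw [List.length_take, List.length_take, hSlen]
    · intro k hk1 hk2
      have hk' : k < t ∧ k < array.length := by simp at hk1; omega
      rw [List.getElem_take, List.getElem_take,
        ← List.getD_eq_getElem array 0 hk'.2, ← List.getD_eq_getElem S 0 (by omega)]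
      exact heq k hk'.1
  have hdrop : (array.drop t).Perm (S.drop t) := by
    have h1 : (array.take t ++ array.drop t).Perm (S.take t ++ S.drop t) := by
      rw [List.take_append_drop, List.take_append_drop]
      exact (PySem.List.sorted_perm ..).symm
    rw [htake] at h1
    exact (List.perm_append_left_iff _).mp h1
  have hmono : ∀ p q : Nat, p ≤ q → q < array.length → S.getD p 0 ≤ S.getD q 0 := by
    intro p q hpq hq
    have hq' : q < (PySem.List.sorted array (fun x => x) false).length := by
      rw [sorted_length]; omega
    have hm := PySem.List.sorted_id_getElem_mono array hpq hq'
    rw [List.getD_eq_getElem S 0 (by omega), List.getD_eq_getElem S 0 (by omega)]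
    exact hm
  intro i hit hvia
  have hin : i < array.length := by omega
  rw [viaLB_iff] at hvia
  obtain ⟨j, hjn, hij, hlt⟩ := hvia
  have hSi : array.getD i 0 = S.getD i 0 := heq i hit
  rcases Nat.lt_or_ge j t with hcase | hcase
  · have hSj : array.getD j 0 = S.getD j 0 := heq j hcase
    have h5 := hmono i j (by omega) hjn
    rw [← hSj, ← hSi] at h5
    omega
  · have hmem : array.getD j 0 ∈ array.drop t := by
      rw [List.getD_eq_getElem array 0 hjn]
      have hidx2 : j - t < (array.drop t).length := by simp; omega
      have h3 : array[j]'(hjn) = (array.drop t)[j - t]'(hidx2) := by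
        rw [List.getElem_drop]
        congr 1
        omega
      rw [h3]
      exact List.getElem_mem _
    have hmem2 : array.getD j 0 ∈ S.drop t := hdrop.mem_iff.mp hmem
    obtain ⟨idx, hidx, hidxe⟩ := List.getElem_of_mem hmem2
    have hidx' : t + idx < S.length := by simp at hidx; omega
    rw [List.getElem_drop] at hidxe
    have h4 : S.getD (t + idx) 0 = array.getD j 0 := by
      rw [List.getD_eq_getElem S 0 hidx']; exact hidxe
    have h5 := hmono i (t + idx) (by omega) (by omega)
    rw [h4, ← hSi] at h5
    omega

lemma sfirst_eq_none_iff (p : Nat → Bool) (t : Nat) :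
    sfirst p t = none ↔ ∀ i < t, ¬ p i := by
  induction t with
  | zero => simp [sfirst]
  | succ t ih =>
    simp only [sfirst]
    cases h : sfirst p t with
    | some k =>
      simp only [reduceCtorEq, false_iff]
      intro hall
      have := ih.mpr (fun i hi => hall i (by omega))
      simp [this] at h
    | none =>
      have hno := ih.mp h
      by_cases hp : p t
      · rw [if_pos hp]
        simp only [reduceCtorEq, false_iff]
        intro hall; exact (hall t (by omega)) hp
      · rw [if_neg hp]
        simp only [true_iff]
        intro i hi
        rcases Nat.lt_succ_iff_lt_or_eq.mp hi with h' | h'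
        · exact hno i h'
        · subst h'; exact hp

lemma sfirst_eq_some_iff (p : Nat → Bool) (t i : Nat) :
    sfirst p t = some i ↔ i < t ∧ p i ∧ ∀ j < i, ¬ p j := by
  induction t generalizing i with
  | zero => simp [sfirst]
  | succ t ih =>
    simp only [sfirst]
    cases h : sfirst p t with
    | some k =>
      have hk := (ih k).mp h
      simp only [Option.some.injEq]
      constructor
      · rintro rfl; exact ⟨by omega, hk.2.1, hk.2.2⟩
      · rintro ⟨hi, hpi, hmin⟩
        by_contra hne
        rcases Nat.lt_or_ge k i with h' | h'
        · exact (hmin k h') hk.2.1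
        · have hik : i < k := by omega
          exact (hk.2.2 i hik) hpi
    | none =>
      have hno := (sfirst_eq_none_iff p t).mp h
      by_cases hp : p t
      · rw [if_pos hp]
        simp only [Option.some.injEq]
        constructor
        · rintro rfl; exact ⟨by omega, hp, fun j hj => hno j hj⟩
        · rintro ⟨hi, hpi, _⟩
          have : ¬ i < t := fun hc => (hno i hc) hpi
          omega
      · rw [if_neg hp]
        simp only [reduceCtorEq, false_iff]
        rintro ⟨hi, hpi, _⟩
        rcases Nat.lt_succ_iff_lt_or_eq.mp hi with h' | h'
        · exact (hno i h') hpi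
        · subst h'; exact hp hpi

lemma slast_eq_none_iff (p : Nat → Bool) (t : Nat) :
    slast p t = none ↔ ∀ i < t, ¬ p i := by
  induction t with
  | zero => simp [slast]
  | succ t ih =>
    simp only [slast]
    by_cases hp : p t
    · rw [if_pos hp]
      simp only [reduceCtorEq, false_iff]
      intro hall; exact (hall t (by omega)) hp
    · rw [if_neg hp, ih]
      constructor
      · intro hall i hi
        rcases Nat.lt_succ_iff_lt_or_eq.mp hi with h' | h'
        · exact hall i h'
        · subst h'; exact hp
      · intro hall i hi; exact hall i (by omega)

lemma slast_eq_some_iff (p : Nat → Bool) (t i : Nat) :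
    slast p t = some i ↔ i < t ∧ p i ∧ ∀ j, i < j → j < t → ¬ p j := by
  induction t generalizing i with
  | zero => simp [slast]
  | succ t ih =>
    simp only [slast]
    by_cases hp : p t
    · rw [if_pos hp]
      simp only [Option.some.injEq]
      constructor
      · rintro rfl; exact ⟨by omega, hp, fun j h1 h2 => by omega⟩
      · rintro ⟨hi, hpi, hmax⟩
        by_contra hne
        have hit : i < t := by omega
        exact (hmax t (by omega) (by omega)) hp
    · rw [if_neg hp, ih]
      constructor
      · rintro ⟨hi, hpi, hmax⟩
        refine ⟨by omega, hpi, fun j h1 h2 => ?_⟩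
        rcases Nat.lt_succ_iff_lt_or_eq.mp h2 with h' | h'
        · exact hmax j h1 h'
        · subst h'; exact hp
      · rintro ⟨hi, hpi, hmax⟩
        have hit : i < t := by
          rcases Nat.lt_succ_iff_lt_or_eq.mp hi with h' | h'
          · exact h'
          · subst h'; exact absurd hpi hp
        exact ⟨hit, hpi, fun j h1 h2 => hmax j h1 (by omega)⟩

lemma slast_congr (p q : Nat → Bool) (n : Nat)
    (h : ∀ t, (∃ i, t ≤ i ∧ i < n ∧ p i) ↔ (∃ i, t ≤ i ∧ i < n ∧ q i)) :
    slast p n = slast q n := by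
  cases hp : slast p n with
  | none =>
    cases hq : slast q n with
    | none => rfl
    | some j =>
      have hq' := (slast_eq_some_iff q n j).mp hq
      have hno := (slast_eq_none_iff p n).mp hp
      obtain ⟨i, _, hin, hpi⟩ := (h 0).mpr ⟨j, by omega, hq'.1, hq'.2.1⟩
      exact absurd hpi (hno i hin)
  | some i =>
    have hp' := (slast_eq_some_iff p n i).mp hp
    cases hq : slast q n with
    | none =>
      have hno := (slast_eq_none_iff q n).mp hq
      obtain ⟨k, _, hkn, hqk⟩ := (h 0).mp ⟨i, by omega, hp'.1, hp'.2.1⟩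
      exact absurd hqk (hno k hkn)
    | some j =>
      have hq' := (slast_eq_some_iff q n j).mp hq
      obtain ⟨k, hk1, hk2, hqk⟩ := (h i).mp ⟨i, le_refl _, hp'.1, hp'.2.1⟩
      have hkj : k ≤ j := by
        by_contra hc
        exact (hq'.2.2 k (by omega) hk2) hqk
      obtain ⟨k2, hk1', hk2', hpk⟩ := (h j).mpr ⟨j, le_refl _, hq'.1, hq'.2.1⟩
      have hki : k2 ≤ i := by
        by_contra hc
        exact (hp'.2.2 k2 (by omega) hk2') hpk
      have : i = j := by omega
      rw [this]

lemma sfirst_congr (p q : Nat → Bool) (n : Nat)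
    (h : ∀ t, t ≤ n → ((∃ i < t, p i) ↔ (∃ i < t, q i))) :
    sfirst p n = sfirst q n := by
  cases hp : sfirst p n with
  | none =>
    cases hq : sfirst q n with
    | none => rfl
    | some j =>
      have hq' := (sfirst_eq_some_iff q n j).mp hq
      have hno := (sfirst_eq_none_iff p n).mp hp
      obtain ⟨i, hin, hpi⟩ := (h n (le_refl _)).mpr ⟨j, hq'.1, hq'.2.1⟩
      exact absurd hpi (hno i hin)
  | some i =>
    have hp' := (sfirst_eq_some_iff p n i).mp hp
    cases hq : sfirst q n with
    | none =>
      have hno := (sfirst_eq_none_iff q n).mp hq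
      obtain ⟨k, hkn, hqk⟩ := (h n (le_refl _)).mp ⟨i, hp'.1, hp'.2.1⟩
      exact absurd hqk (hno k hkn)
    | some j =>
      have hq' := (sfirst_eq_some_iff q n j).mp hq
      obtain ⟨k, hk1, hqk⟩ := (h (i+1) (by omega)).mp ⟨i, by omega, hp'.2.1⟩
      have hji : j ≤ k := by
        by_contra hc
        exact (hq'.2.2 k (by omega)) hqk
      obtain ⟨k2, hk2, hpk⟩ := (h (j+1) (by omega)).mpr ⟨j, by omega, hq'.2.1⟩
      have hij : i ≤ k2 := by
        by_contra hc
        exact (hp'.2.2 k2 (by omega)) hpk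
      have : i = j := by omega
      rw [this]

lemma pmaxOpt_eq_none_iff (array : List Int) (t : Nat) :
    pmaxOpt array t = none ↔ t = 0 := by
  cases t <;> simp [pmaxOpt]

lemma pmaxOpt_spec (array : List Int) (t : Nat) (m : Int) (h : pmaxOpt array t = some m) :
    (∀ j < t, array.getD j 0 ≤ m) ∧ ∃ j < t, array.getD j 0 = m := by
  induction t generalizing m with
  | zero => simp [pmaxOpt] at h
  | succ t ih =>
    simp only [pmaxOpt, Option.some.injEq] at h
    cases h' : pmaxOpt array t with
    | none =>
      have ht0 : t = 0 := (pmaxOpt_eq_none_iff array t).mp h'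
      subst ht0
      rw [h'] at h
      have h2 : array.getD 0 0 = m := h
      refine ⟨fun j hj => ?_, 0, by omega, h2⟩
      have : j = 0 := by omega
      subst this; omega
    | some m' =>
      rw [h'] at h
      have h2 : (if array.getD t 0 > m' then array.getD t 0 else m') = m := h
      clear h
      have ih' := ih m' h'
      by_cases hgt : array.getD t 0 > m'
      · rw [if_pos hgt] at h2
        subst h2
        refine ⟨fun j hj => ?_, t, by omega, rfl⟩
        rcases Nat.lt_succ_iff_lt_or_eq.mp hj with h3 | h3
        · exact le_of_lt (lt_of_le_of_lt (ih'.1 j h3) hgt)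
        · subst h3; exact le_refl _
      · rw [if_neg hgt] at h2
        subst h2
        obtain ⟨j0, hj0, hje⟩ := ih'.2
        refine ⟨fun j hj => ?_, j0, by omega, hje⟩
        rcases Nat.lt_succ_iff_lt_or_eq.mp hj with h3 | h3
        · exact ih'.1 j h3
        · subst h3; omega

lemma sminC_eq_none_iff (array : List Int) (n c : Nat) :
    sminC array n c = none ↔ c = 0 := by
  cases c <;> simp [sminC]

lemma sminC_spec (array : List Int) (n c : Nat) (m : Int) (hc : c ≤ n)
    (h : sminC array n c = some m) :
    (∀ j, n - c ≤ j → j < n → m ≤ array.getD j 0) ∧ ∃ j, n - c ≤ j ∧ j < n ∧ array.getD j 0 = m := by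
  induction c generalizing m with
  | zero => simp [sminC] at h
  | succ c ih =>
    simp only [sminC, Option.some.injEq] at h
    cases h' : sminC array n c with
    | none =>
      have hc0 : c = 0 := (sminC_eq_none_iff array n c).mp h'
      subst hc0
      rw [h'] at h
      have h2 : array.getD (n - 1) 0 = m := h
      refine ⟨fun j hj1 hj2 => ?_, n - 1, by omega, by omega, h2⟩
      have : j = n - 1 := by omega
      subst this; omega
    | some m' =>
      rw [h'] at h
      have h2 : (if array.getD (n - (c+1)) 0 < m' then array.getD (n - (c+1)) 0 else m') = m := h
      clear h
      have ih' := ih m' (by omega) h'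
      by_cases hlt : array.getD (n - (c+1)) 0 < m'
      · rw [if_pos hlt] at h2
        subst h2
        refine ⟨fun j hj1 hj2 => ?_, n - (c+1), le_refl _, by omega, rfl⟩
        rcases Nat.eq_or_lt_of_le hj1 with h3 | h3
        · rw [← h3]
        · exact le_of_lt (lt_of_lt_of_le hlt (ih'.1 j (by omega) hj2))
      · rw [if_neg hlt] at h2
        subst h2
        obtain ⟨j0, hj0a, hj0b, hje⟩ := ih'.2
        refine ⟨fun j hj1 hj2 => ?_, j0, by omega, hj0b, hje⟩
        rcases Nat.eq_or_lt_of_le hj1 with h3 | h3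
        · rw [← h3]; omega
        · exact ih'.1 j (by omega) hj2

lemma enumerate_append_singleton {α : Type} (xs : List α) (y : α) (s : Int) :
    PySem.List.enumerate (xs ++ [y]) s = PySem.List.enumerate xs s ++ [((s + xs.length : Int), y)] := by
  induction xs generalizing s with
  | nil => simp [PySem.List.enumerate_nil, PySem.List.enumerate_cons]
  | cons x xs ih =>
    simp only [List.cons_append, PySem.List.enumerate_cons, ih, List.length_cons]
    congr 2
    push_cast
    ring_nf

lemma Afold (array : List Int) (t : Nat) :
    (PySem.List.pyRange 0 (t : Int) 1).foldl
      (fun ans i =>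
        if PySem.List.pyGetD array i 0 ≠ PySem.List.pyGetD (PySem.List.sorted array (fun x => x) false) i 0 then
          ((if ans.1 = -1 then i else ans.1), i)
        else ans)
      (-1, -1)
    = (onat (sfirst (misB array) t), onat (slast (misB array) t)) := by
  induction t with
  | zero =>
    rw [PySem.List.pyRange_one_eq_nil (by omega)]
    simp [sfirst, slast, onat]
  | succ t ih =>
    have hcast : ((t + 1 : Nat) : Int) = (t : Int) + 1 := by push_cast; ring
    rw [hcast, PySem.List.pyRange_one_succ_right (by omega), List.foldl_append, ih]
    simp only [List.foldl_cons, List.foldl_nil]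
    rw [PySem.List.pyGetD_natCast, PySem.List.pyGetD_natCast]
    by_cases hm : misB array t
    · have hcond : array.getD t 0 ≠ (PySem.List.sorted array (fun x => x) false).getD t 0 :=
        (misB_iff array t).mp hm
      rw [if_pos hcond]
      have hl : slast (misB array) (t + 1) = some t := by simp [slast, hm]
      cases hf : sfirst (misB array) t with
      | none =>
        have hf1 : sfirst (misB array) (t + 1) = some t := by simp [sfirst, hf, hm]
        simp [onat, hf, hf1, hl]
      | some k =>
        have hf1 : sfirst (misB array) (t + 1) = some k := by simp [sfirst, hf]
        have hk : ((k : Nat) : Int) ≠ -1 := by omega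
        simp [onat, hf, hf1, hl, hk]
    · have hcond : ¬ array.getD t 0 ≠ (PySem.List.sorted array (fun x => x) false).getD t 0 :=
        fun hne => hm ((misB_iff array t).mpr hne)
      rw [if_neg hcond]
      have hl : slast (misB array) (t + 1) = slast (misB array) t := by simp [slast, hm]
      have hf1 : sfirst (misB array) (t + 1) = sfirst (misB array) t := by
        cases hf : sfirst (misB array) t <;> simp [sfirst, hf, hm]
      rw [hl, hf1]

lemma subarraySort_eq (array : List Int) :
    subarraySort array =
      [onat (sfirst (misB array) array.length), onat (slast (misB array) array.length)] := by
  simp only [subarraySort]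
  rw [Afold array array.length]

lemma Bfold1 (array : List Int) (t : Nat) (ht : t ≤ array.length) :
    ((PySem.List.enumerate (array.take t)).foldl
      (fun (st : Int × Option Int) p =>
        let right := match st.2 with
          | some m => if p.2 < m then p.1 else st.1
          | none => st.1
        let curmax := match st.2 with
          | some m => if p.2 > m then some p.2 else some m
          | none => some p.2
        (right, curmax))
      (-1, none))
    = (onat (slast (viaRB array) t), pmaxOpt array t) := by
  induction t with
  | zero => simp [PySem.List.enumerate_nil, slast, onat, pmaxOpt]
  | succ t ih =>
    have htn : t < array.length := by omega
    rw [List.take_succ_eq_append_getElem htn, enumerate_append_singleton, List.foldl_append,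
      ih (by omega)]
    have hpair : (0 + ((array.take t).length : Int)) = ((t : Nat) : Int) := by
      rw [List.length_take]
      push_cast
      omega
    rw [hpair]
    simp only [List.foldl_cons, List.foldl_nil]
    have harr : array[t]'htn = array.getD t 0 := (List.getD_eq_getElem array 0 htn).symm
    cases hpm : pmaxOpt array t with
    | none =>
      have ht0 : t = 0 := (pmaxOpt_eq_none_iff array t).mp hpm
      subst ht0
      have hvr : ¬ viaRB array 0 = true := by
        rw [viaRB_iff]
        rintro ⟨j, hj, -⟩
        omega
      have hl : slast (viaRB array) 1 = none := by simp [slast, hvr]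
      simp [hpm, hl, onat, slast, hvr, pmaxOpt, harr]
    | some m =>
      have hspec := pmaxOpt_spec array t m hpm
      have hsnd : pmaxOpt array (t + 1)
          = some (if array.getD t 0 > m then array.getD t 0 else m) := by
        simp [pmaxOpt, hpm]
      simp only [hpm, harr, Prod.mk.injEq]
      refine ⟨?_, by rw [hsnd, apply_ite some]⟩
      by_cases hvr : viaRB array t = true
      · have hlt : array.getD t 0 < m := by
          obtain ⟨j, hj, hlt'⟩ := (viaRB_iff array t).mp hvr
          have := hspec.1 j hj
          omega
        have hl : slast (viaRB array) (t + 1) = some t := by simp [slast, hvr]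
        rw [if_pos hlt, hl]
        rfl
      · have hge : ¬ (array.getD t 0 < m) := by
          intro hlt
          obtain ⟨j, hj, hje⟩ := hspec.2
          exact hvr ((viaRB_iff array t).mpr ⟨j, hj, by omega⟩)
        have hl : slast (viaRB array) (t + 1) = slast (viaRB array) t := by simp [slast, hvr]
        rw [if_neg hge, hl]

lemma Bfold2 (array : List Int) (t : Nat) (ht : t ≤ array.length) : ∀ l : Int,
    ((PySem.List.pyRange ((t : Int) - 1) (-1) (-1)).foldl
      (fun (st2 : Int × Option Int) i =>
        let x := PySem.List.pyGetD array i 0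
        let left := match st2.2 with
          | some m => if x > m then i else st2.1
          | none => st2.1
        let curmin := match st2.2 with
          | some m => if x < m then some x else some m
          | none => some x
        (left, curmin))
      (l, sminC array array.length (array.length - t)))
    = ((match sfirst (viaLB array) t with | some i => ((i : Nat) : Int) | none => l),
        sminC array array.length array.length) := by
  induction t with
  | zero =>
    intro l
    rw [PySem.List.pyRange_neg_one_eq_nil (by omega)]
    simp [sfirst]
  | succ t ih =>
    intro l
    have htn : t < array.length := by omega
    have hcast : ((t + 1 : Nat) : Int) - 1 = ((t : Nat) : Int) := by push_cast; ring
    rw [hcast, PySem.List.pyRange_neg_one_cons (by omega), List.foldl_cons]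
    rw [PySem.List.pyGetD_natCast]
    cases hsm : sminC array array.length (array.length - (t + 1)) with
    | none =>
      have h0 : array.length - (t + 1) = 0 := (sminC_eq_none_iff array array.length _).mp hsm
      have hn : array.length = t + 1 := by omega
      have hvl : ¬ viaLB array t = true := by
        rw [viaLB_iff]
        rintro ⟨j, hjn, hij, -⟩
        omega
      have hmin : sminC array array.length (array.length - t) = some (array.getD t 0) := by
        have h1 : array.length - t = 1 := by omega
        rw [h1]
        simp only [sminC]
        rw [show array.length - 1 = t by omega]
      simp only [hsm]
      rw [show (some (array.getD t 0) : Option Int) = sminC array array.length (array.length - t)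
        from hmin.symm]
      rw [ih (by omega) l]
      cases hf : sfirst (viaLB array) t <;> simp [sfirst, hf, hvl]
    | some m =>
      have hspec := sminC_spec array array.length (array.length - (t + 1)) m (by omega) hsm
      have hrange : array.length - (array.length - (t + 1)) = t + 1 := by omega
      have hstep : sminC array array.length (array.length - t)
          = some (if array.getD t 0 < m then array.getD t 0 else m) := by
        have h1 : array.length - t = (array.length - (t + 1)) + 1 := by omega
        rw [h1]
        simp only [sminC]
        rw [show array.length - ((array.length - (t + 1)) + 1) = t by omega, hsm]
      simp only [hsm]
      rw [show (if array.getD t 0 < m then some (array.getD t 0) else some m)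
          = sminC array array.length (array.length - t) by rw [hstep, apply_ite some]]
      rw [ih (by omega) (if array.getD t 0 > m then ((t : Nat) : Int) else l)]
      by_cases hvl : viaLB array t = true
      · have hgt : array.getD t 0 > m := by
          obtain ⟨j, hjn, htj, hlt⟩ := (viaLB_iff array t).mp hvl
          have := hspec.1 j (by omega) hjn
          omega
        have hif : (if array.getD t 0 > m then ((t : Nat) : Int) else l) = ((t : Nat) : Int) :=
          if_pos hgt
        cases hf : sfirst (viaLB array) t with
        | none =>
          have h6 : sfirst (viaLB array) (t + 1) = some t := by simp [sfirst, hf, hvl]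
          simp only [hf, h6, hif]
        | some k =>
          have h6 : sfirst (viaLB array) (t + 1) = some k := by simp [sfirst, hf]
          simp only [hf, h6]
      · have hng : ¬ array.getD t 0 > m := by
          intro hgt
          obtain ⟨j, hj1, hj2, hje⟩ := hspec.2
          exact hvl ((viaLB_iff array t).mpr ⟨j, hj2, by omega, by omega⟩)
        have hif : (if array.getD t 0 > m then ((t : Nat) : Int) else l) = l := if_neg hng
        cases hf : sfirst (viaLB array) t with
        | none =>
          have h6 : sfirst (viaLB array) (t + 1) = none := by simp [sfirst, hf, hvl]
          simp only [hf, h6, hif]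
        | some k =>
          have h6 : sfirst (viaLB array) (t + 1) = some k := by simp [sfirst, hf]
          simp only [hf, h6, hif]

lemma subarraySort_alt_eq (array : List Int) :
    subarraySort_alt array =
      if onat (slast (viaRB array) array.length) = -1 then [-1, -1]
      else [onat (sfirst (viaLB array) array.length), onat (slast (viaRB array) array.length)] := by
  have h1 := Bfold1 array array.length (le_refl _)
  rw [List.take_length] at h1
  have h2 := Bfold2 array array.length (le_refl _) (-1)
  rw [Nat.sub_self] at h2
  simp only [sminC] at h2
  have h3 : (match sfirst (viaLB array) array.length with
      | some i => ((i : Nat) : Int) | none => (-1 : Int)) = onat (sfirst (viaLB array) array.length) := by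
    cases hf : sfirst (viaLB array) array.length <;> simp [onat]
  simp only [subarraySort_alt]
  rw [h1]
  by_cases hnone : onat (slast (viaRB array) array.length) = -1
  · rw [if_pos hnone, if_pos hnone]
  · rw [if_neg hnone, if_neg hnone]
    rw [h2, h3]

-- ===== VERDICT (by name: the statement is the Claim_ definition above) =====
theorem subarraySort_spec : Claim_equal_subarraySort := by
  intro array _
  unfold Spec_subarraySort
  rw [subarraySort_eq, subarraySort_alt_eq]
  have E1 : ∀ t', (∃ i, t' ≤ i ∧ i < array.length ∧ misB array i = true)
      ↔ (∃ i, t' ≤ i ∧ i < array.length ∧ viaRB array i = true) := by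
    intro t'
    by_cases hle : t' ≤ array.length
    · constructor
      · rintro ⟨i, h1, h2, h3⟩
        by_contra hno
        push_neg at hno
        have hno' : ∀ k, t' ≤ k → k < array.length → ¬ viaRB array k = true := by
          intro k hk1 hk2 hv
          exact absurd hv (by have := hno k hk1 hk2; simpa using this)
        exact absurd h3 (T1 array t' hle hno' i h1 h2)
      · rintro ⟨i, h1, h2, h3⟩
        by_contra hno
        push_neg at hno
        have hno' : ∀ k, t' ≤ k → k < array.length → ¬ misB array k = true := by
          intro k hk1 hk2 hv
          exact absurd hv (by have := hno k hk1 hk2; simpa using this)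
        exact absurd h3 (T2 array t' hle hno' i h1 h2)
    · constructor <;> (rintro ⟨i, h1, h2, h3⟩; omega)
  have E2 : ∀ t', t' ≤ array.length →
      ((∃ i < t', misB array i = true) ↔ (∃ i < t', viaLB array i = true)) := by
    intro t' hle
    constructor
    · rintro ⟨i, h1, h2⟩
      by_contra hno
      push_neg at hno
      have hno' : ∀ k, k < t' → ¬ viaLB array k = true := by
        intro k hk hv
        exact absurd hv (by have := hno k hk; simpa using this)
      exact absurd h2 (T1' array t' hle hno' i h1)
    · rintro ⟨i, h1, h2⟩
      by_contra hno
      push_neg at hno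
      have hno' : ∀ k, k < t' → ¬ misB array k = true := by
        intro k hk hv
        exact absurd hv (by have := hno k hk; simpa using this)
      exact absurd h2 (T2' array t' hle hno' i h1)
  have hlastEq : slast (misB array) array.length = slast (viaRB array) array.length :=
    slast_congr _ _ _ E1
  have hfirstEq : sfirst (misB array) array.length = sfirst (viaLB array) array.length :=
    sfirst_congr _ _ _ E2
  rw [hlastEq, hfirstEq]
  by_cases hnone : onat (slast (viaRB array) array.length) = -1
  · rw [if_pos hnone]
    have hl : slast (viaRB array) array.length = none := by
      cases hv : slast (viaRB array) array.length with
      | none => rfl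
      | some i =>
        rw [hv] at hnone
        exact absurd hnone (by simp [onat])
    have hnoR := (slast_eq_none_iff (viaRB array) array.length).mp hl
    have hnoM : ∀ i < array.length, ¬ misB array i = true := by
      intro i hi hm
      obtain ⟨k, _, hk2, hk3⟩ := (E1 0).mp ⟨i, by omega, hi, hm⟩
      exact (hnoR k hk2) hk3
    have hf : sfirst (viaLB array) array.length = none := by
      rw [sfirst_eq_none_iff]
      intro i hi hvl
      obtain ⟨k, hk, hmk⟩ := (E2 array.length (le_refl _)).mpr ⟨i, hi, hvl⟩
      exact (hnoM k hk) hmk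
    rw [hl, hf]
    rfl
  · rw [if_neg hnone]
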